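-- pv_equiv track=rewrite | github.com/martineberlein/avicenna | src/avicenna/execution/helpers.py | split_cli
-- ===== SOURCE A (Python) =====
-- def read_escaped_token(line, pos):
--     mode = "NORMAL"
--     cp = pos + 1
--     while cp < len(line):
--         if line[cp] == "'" and "NORMAL" == mode:
--             return line[pos : cp + 1], cp + 1
--         elif mode == "ESCAPED":
--             mode = "NORMAL"
--         elif line[cp] == "\\" and "NORMAL" == mode:
--             mode = "ESCAPED"
--         cp = cp + 1
--     raise AssertionError("Missing closing quotation.")
--
-- def read_unescaped_token(line, pos):
--     end = line.find(" ", pos)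
--     if -1 == end:
--         return line[pos:], len(line)
--     return line[pos:end], end
--
-- def split_cli(line):
--     pos = 0
--     while pos < len(line):
--         if "'" == line[pos]:
--             token, pos = read_escaped_token(line, pos)
--             yield token
--         elif " " == line[pos]:
--             pos = pos + 1
--         else:
--             token, pos = read_unescaped_token(line, pos)
--             yield token
-- ===== SOURCE B (Python) =====
-- def split_cli(line):
--     # Single-pass character state machine: NORMAL between tokens, IN_UNQUOTED,
--     # IN_QUOTED (quote chars kept in the token), ESCAPED after a backslash.
--     buf = []
--     state = "NORMAL"
--     for ch in line:
--         if state == "NORMAL":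
--             if ch == " ":
--                 continue
--             buf.append(ch)
--             state = "IN_QUOTED" if ch == "'" else "IN_UNQUOTED"
--         elif state == "IN_UNQUOTED":
--             if ch == " ":
--                 yield "".join(buf)
--                 buf = []
--                 state = "NORMAL"
--             else:
--                 buf.append(ch)
--         elif state == "IN_QUOTED":
--             buf.append(ch)
--             if ch == "\\":
--                 state = "ESCAPED"
--             elif ch == "'":
--                 yield "".join(buf)
--                 buf = []
--                 state = "NORMAL"
--         else:  # ESCAPED
--             buf.append(ch)
--             state = "IN_QUOTED"
--     if state in ("IN_QUOTED", "ESCAPED"):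
--         raise AssertionError("Missing closing quotation.")
--     if buf:
--         yield "".join(buf)
-- ===== Notes on version B (the rewrite author's own statement) =====
-- stated objective: alternative
-- what changed: Replaced A's index-based scanner (helper functions that find/slice the next token with str.find and explicit positions) by a single uniform character-at-a-time state machine (NORMAL/IN_UNQUOTED/IN_QUOTED/ESCAPED) accumulating a buffer.
import Mathlib
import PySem

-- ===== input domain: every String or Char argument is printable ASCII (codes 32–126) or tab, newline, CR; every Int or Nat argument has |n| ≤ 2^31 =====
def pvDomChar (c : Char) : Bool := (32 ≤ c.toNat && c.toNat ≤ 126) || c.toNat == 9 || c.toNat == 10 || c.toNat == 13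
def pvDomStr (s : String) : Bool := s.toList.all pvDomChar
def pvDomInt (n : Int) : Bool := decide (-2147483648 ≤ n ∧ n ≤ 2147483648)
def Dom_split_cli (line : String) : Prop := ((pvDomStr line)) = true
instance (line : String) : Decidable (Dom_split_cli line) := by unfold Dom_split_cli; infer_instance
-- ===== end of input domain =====

-- B replaces A's index/find/slice token scanner by a single character-at-a-time state machine (alternative
-- decomposition, same O(n) cost). Both Pythons are generators; equivalence is about list(split_cli(line)).

-- ===== PORT A =====
-- string ops are ported on code points (List Char) with PySem.Chars/PySem.List, as PYSEM.md prescribes.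

-- while loop of read_escaped_token; 'none' = the AssertionError("Missing closing quotation.")
def readEscapedAux (cs : List Char) (pos : Nat) (mode : String) (cp : Nat) :
    Option (List Char × Nat) :=
  if h : cp < cs.length then
    if cs[cp] = '\'' ∧ "NORMAL" = mode then
      some (PySem.List.slice cs (some (pos : Int)) (some ((cp : Int) + 1)), cp + 1)
    else if mode = "ESCAPED" then
      readEscapedAux cs pos "NORMAL" (cp + 1)
    else if cs[cp] = '\\' ∧ "NORMAL" = mode then
      readEscapedAux cs pos "ESCAPED" (cp + 1)
    else
      readEscapedAux cs pos mode (cp + 1)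
  else none
termination_by cs.length - cp

def readUnescapedToken (cs : List Char) (pos : Nat) : List Char × Nat :=
  let e := PySem.Chars.findFrom cs [' '] (pos : Int) none
  if (-1 : Int) = e then (PySem.List.slice cs (some (pos : Int)) none, cs.length)
  else (PySem.List.slice cs (some (pos : Int)) (some e), e.toNat)

-- the while loop of split_cli; fuel only makes the loop total (pos strictly increases each iteration,
-- so fuel = length+1 is never exhausted); 'acc' collects the yielded tokens.
def splitCliAux (cs : List Char) (pos : Nat) (acc : List String) (fuel : Nat) : List String :=
  match fuel with
  | 0 => acc
  | fuel + 1 =>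
    if h : pos < cs.length then
      if cs[pos] = '\'' then
        match readEscapedAux cs pos "NORMAL" (pos + 1) with
        | some (tok, p') => splitCliAux cs p' (acc ++ [String.ofList tok]) fuel
        | none => acc  -- Python raises AssertionError here (outside Pre_)
      else if cs[pos] = ' ' then
        splitCliAux cs (pos + 1) acc fuel
      else
        match readUnescapedToken cs pos with
        | (tok, p') => splitCliAux cs p' (acc ++ [String.ofList tok]) fuel
    else acc

def split_cli (line : String) : List String :=
  splitCliAux line.toList 0 [] (line.toList.length + 1)

-- ===== PORT B =====
inductive FsmState where
  | normal | inUnquoted | inQuoted | escaped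
deriving DecidableEq, Repr

def fsmB (cs : List Char) (st : FsmState) (buf : List Char) (acc : List String) : List String :=
  match cs with
  | [] =>
    match st with
    | .inQuoted => acc   -- Python raises AssertionError here (outside Pre_)
    | .escaped => acc    -- Python raises AssertionError here (outside Pre_)
    | _ => if buf.isEmpty then acc else acc ++ [String.ofList buf]
  | c :: rest =>
    match st with
    | .normal =>
      if c = ' ' then fsmB rest .normal buf acc
      else fsmB rest (if c = '\'' then .inQuoted else .inUnquoted) (buf ++ [c]) acc
    | .inUnquoted =>
      if c = ' ' then fsmB rest .normal [] (acc ++ [String.ofList buf])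
      else fsmB rest .inUnquoted (buf ++ [c]) acc
    | .inQuoted =>
      if c = '\\' then fsmB rest .escaped (buf ++ [c]) acc
      else if c = '\'' then fsmB rest .normal [] (acc ++ [String.ofList (buf ++ [c])])
      else fsmB rest .inQuoted (buf ++ [c]) acc
    | .escaped => fsmB rest .inQuoted (buf ++ [c]) acc

def split_cli_alt (line : String) : List String := fsmB line.toList .normal [] []

-- ===== PRECONDITION & SPEC =====
-- Pre_ excludes exactly the lines with an unterminated quoted token (a token starting with ',
-- whose closing ' — with backslash escaping one following character — is missing): there the
-- Python A raises AssertionError("Missing closing quotation.") and returns no value (B raises too).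
-- It is the grammar 'space-separated tokens; a token starting with a quote is properly closed'.
mutual
def wqTokens : List Char → Bool
  | [] => true
  | c :: r =>
    if c = ' ' then wqTokens r
    else if c = '\'' then wqQuoted r
    else wqUnquoted r
def wqUnquoted : List Char → Bool
  | [] => true
  | c :: r =>
    if c = ' ' then wqTokens r
    else wqUnquoted r
def wqQuoted : List Char → Bool
  | [] => false
  | [c] => if c = '\'' then true else false
  | c :: c2 :: r =>
    if c = '\\' then wqQuoted r
    else if c = '\'' then wqTokens (c2 :: r)
    else wqQuoted (c2 :: r)
end

def Pre_split_cli (line : String) : Prop := wqTokens line.toList = true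
instance (line : String) : Decidable (Pre_split_cli line) := by unfold Pre_split_cli; infer_instance

def pvWitness_split_cli : String := "run 'a b\\'c' x"

def Spec_split_cli (line : String) (out : List String) : Prop := out = split_cli_alt line
instance (line : String) (out : List String) : Decidable (Spec_split_cli line out) := by unfold Spec_split_cli; infer_instance

-- ===== CLAIM (what is proved, stated in full; the proofs are below) =====
def Claim_equal_split_cli : Prop := ∀ (line : String), Dom_split_cli line → Pre_split_cli line → Spec_split_cli line (split_cli line)

-- ===== LEMMAS AND PROOFS =====

theorem fsm_unquoted (r : List Char) : ∀ (buf : List Char) (acc : List String), buf ≠ [] →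
    fsmB r .inUnquoted buf acc =
      match r.dropWhile (· ≠ ' ') with
      | [] => acc ++ [String.ofList (buf ++ r.takeWhile (· ≠ ' '))]
      | _ :: r'' => fsmB r'' .normal [] (acc ++ [String.ofList (buf ++ r.takeWhile (· ≠ ' '))]) := by
  induction r with
  | nil => intro buf acc hb; simp [fsmB, hb]
  | cons x r ih =>
    intro buf acc hb
    by_cases hx : x = ' '
    · subst hx; simp [fsmB]
    · rw [show fsmB (x :: r) .inUnquoted buf acc = fsmB r .inUnquoted (buf ++ [x]) acc by simp [fsmB, hx]]
      rw [ih (buf ++ [x]) acc (by simp)]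
      simp [hx]

theorem wqQuoted_nil : wqQuoted [] = false := by rw [wqQuoted.eq_def]
theorem wqQuoted_bs_nil : wqQuoted ['\\'] = false := by rw [wqQuoted.eq_def]; simp
theorem wqQuoted_bs (c : Char) (r : List Char) : wqQuoted ('\\' :: c :: r) = wqQuoted r := by
  rw [wqQuoted.eq_def]; simp
theorem wqQuoted_quote (r : List Char) : wqQuoted ('\'' :: r) = wqTokens r := by
  cases r with
  | nil => rw [wqQuoted.eq_def, wqTokens.eq_def]; simp
  | cons c2 r => rw [wqQuoted.eq_def]; simp
theorem wqQuoted_other (c : Char) (r : List Char) (h1 : c ≠ '\\') (h2 : c ≠ '\'') :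
    wqQuoted (c :: r) = wqQuoted r := by
  cases r with
  | nil => rw [wqQuoted.eq_def, wqQuoted.eq_def]; simp [h2]
  | cons c2 r => rw [wqQuoted.eq_def]; simp [h1, h2]
theorem wqTokens_nil : wqTokens [] = true := by rw [wqTokens.eq_def]
theorem wqTokens_space (r : List Char) : wqTokens (' ' :: r) = wqTokens r := by
  rw [wqTokens.eq_def]; simp
theorem wqTokens_quote (r : List Char) : wqTokens ('\'' :: r) = wqQuoted r := by
  rw [wqTokens.eq_def]; simp
theorem wqTokens_other (c : Char) (r : List Char) (h1 : c ≠ ' ') (h2 : c ≠ '\'') :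
    wqTokens (c :: r) = wqUnquoted r := by
  rw [wqTokens.eq_def]; simp [h1, h2]

theorem wqTokens_space' (r : List Char) : wqTokens (' ' :: r) = wqTokens r := by
  rw [wqTokens.eq_def]; simp

theorem wqUnquoted_eq (r : List Char) : wqUnquoted r = wqTokens (r.dropWhile (· ≠ ' ')) := by
  induction r with
  | nil => rw [wqUnquoted.eq_def, wqTokens.eq_def]; simp
  | cons c r ih =>
    by_cases hc : c = ' '
    · subst hc
      rw [wqUnquoted.eq_def]
      simp [wqTokens_space']
    · rw [wqUnquoted.eq_def]
      simp [hc, ih]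

theorem rea_close (cs : List Char) (pos cp : Nat) (h : cp < cs.length) (hq : cs[cp] = '\'') :
    readEscapedAux cs pos "NORMAL" cp
      = some (PySem.List.slice cs (some (pos : Int)) (some ((cp : Int) + 1)), cp + 1) := by
  rw [readEscapedAux]; simp [h, hq]

theorem rea_bs (cs : List Char) (pos cp : Nat) (h : cp < cs.length) (hb : cs[cp] = '\\') :
    readEscapedAux cs pos "NORMAL" cp = readEscapedAux cs pos "ESCAPED" (cp + 1) := by
  rw [readEscapedAux]; simp [h, hb]

theorem rea_esc (cs : List Char) (pos cp : Nat) (h : cp < cs.length) :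
    readEscapedAux cs pos "ESCAPED" cp = readEscapedAux cs pos "NORMAL" (cp + 1) := by
  rw [readEscapedAux]; simp [h]

theorem rea_other (cs : List Char) (pos cp : Nat) (h : cp < cs.length)
    (h1 : cs[cp] ≠ '\'') (h2 : cs[cp] ≠ '\\') :
    readEscapedAux cs pos "NORMAL" cp = readEscapedAux cs pos "NORMAL" (cp + 1) := by
  rw [readEscapedAux]; simp [h, h1, h2]

theorem quoted_scan (cs : List Char) (pos : Nat) :
    ∀ (n cp : Nat) (buf : List Char) (acc : List String),
      cs.length - cp ≤ n → wqQuoted (cs.drop cp) = true →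
      ∃ e : Nat, cp ≤ e ∧ e < cs.length ∧
        readEscapedAux cs pos "NORMAL" cp
          = some (PySem.List.slice cs (some (pos : Int)) (some ((e : Int) + 1)), e + 1) ∧
        fsmB (cs.drop cp) .inQuoted buf acc
          = fsmB (cs.drop (e + 1)) .normal []
              (acc ++ [String.ofList (buf ++ (cs.drop cp).take (e + 1 - cp))]) ∧
        wqTokens (cs.drop (e + 1)) = true := by
  intro n
  induction n with
  | zero =>
    intro cp buf acc hn hwq
    rw [List.drop_eq_nil_of_le (by omega)] at hwq
    simp [wqQuoted_nil] at hwq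
  | succ n ih =>
    intro cp buf acc hn hwq
    have hcp : cp < cs.length := by
      by_contra hc
      rw [List.drop_eq_nil_of_le (by omega)] at hwq
      simp [wqQuoted_nil] at hwq
    have hdrop : cs.drop cp = cs[cp] :: cs.drop (cp + 1) := List.drop_eq_getElem_cons hcp
    by_cases hb : cs[cp] = '\\'
    · have hcp1 : cp + 1 < cs.length := by
        by_contra hc
        rw [hdrop, hb, List.drop_eq_nil_of_le (by omega)] at hwq
        simp [wqQuoted_bs_nil] at hwq
      have hdrop1 : cs.drop (cp + 1) = cs[cp + 1] :: cs.drop (cp + 2) :=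
        List.drop_eq_getElem_cons hcp1
      have hwq2 : wqQuoted (cs.drop (cp + 2)) = true := by
        rw [hdrop, hb, hdrop1, wqQuoted_bs] at hwq; exact hwq
      obtain ⟨e, he1, he2, hA, hB, hW⟩ :=
        ih (cp + 2) (buf ++ [cs[cp]] ++ [cs[cp + 1]]) acc (by omega) hwq2
      refine ⟨e, by omega, he2, ?_, ?_, hW⟩
      · rw [rea_bs cs pos cp hcp hb, rea_esc cs pos (cp + 1) hcp1, hA]
      · rw [hdrop, hdrop1]
        rw [show fsmB (cs[cp] :: cs[cp + 1] :: cs.drop (cp + 2)) .inQuoted buf acc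
              = fsmB (cs.drop (cp + 2)) .inQuoted (buf ++ [cs[cp]] ++ [cs[cp + 1]]) acc by
            simp [fsmB, hb]]
        rw [hB]
        have h1 : e + 1 - cp = (e + 1 - (cp + 2)) + 1 + 1 := by omega
        rw [h1]
        simp
        rw [List.drop_eq_getElem_cons hcp, List.take_succ_cons,
            List.drop_eq_getElem_cons hcp1, List.take_succ_cons]
    · by_cases hq : cs[cp] = '\''
      · have hwq2 : wqTokens (cs.drop (cp + 1)) = true := by
          rw [hdrop, hq, wqQuoted_quote] at hwq; exact hwq
        refine ⟨cp, le_refl cp, hcp, rea_close cs pos cp hcp hq, ?_, hwq2⟩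
        rw [hdrop, hq]
        rw [show fsmB ('\'' :: cs.drop (cp + 1)) .inQuoted buf acc
              = fsmB (cs.drop (cp + 1)) .normal [] (acc ++ [String.ofList (buf ++ ['\''])]) by
            simp [fsmB]]
        have h1 : cp + 1 - cp = 0 + 1 := by omega
        rw [h1]
        simp [List.take_succ_cons]
      · have hwq2 : wqQuoted (cs.drop (cp + 1)) = true := by
          rw [hdrop, wqQuoted_other cs[cp] _ hb hq] at hwq; exact hwq
        obtain ⟨e, he1, he2, hA, hB, hW⟩ :=
          ih (cp + 1) (buf ++ [cs[cp]]) acc (by omega) hwq2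
        refine ⟨e, by omega, he2, ?_, ?_, hW⟩
        · rw [rea_other cs pos cp hcp hq hb, hA]
        · rw [hdrop]
          rw [show fsmB (cs[cp] :: cs.drop (cp + 1)) .inQuoted buf acc
                = fsmB (cs.drop (cp + 1)) .inQuoted (buf ++ [cs[cp]]) acc by
              simp [fsmB, hb, hq]]
          rw [hB]
          have h1 : e + 1 - cp = (e + 1 - (cp + 1)) + 1 := by omega
          rw [h1]
          simp
          rw [List.drop_eq_getElem_cons hcp, List.take_succ_cons]

theorem dropWhile_eq_drop (p : Char → Bool) (l : List Char) :
    l.dropWhile p = l.drop (l.takeWhile p).length := by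
  have h : l.drop (l.takeWhile p).length
      = (l.takeWhile p ++ l.dropWhile p).drop (l.takeWhile p).length := by
    rw [List.takeWhile_append_dropWhile]
  rw [h, List.drop_left]

theorem takeWhile_length_eq (s : List Char) :
    ∀ i : Nat, s[i]? = some ' ' → (∀ j, j < i → s[j]? ≠ some ' ') →
    (s.takeWhile (· ≠ ' ')).length = i := by
  induction s with
  | nil => intro i hsp _; simp at hsp
  | cons c r ih =>
    intro i hsp hmin
    match i with
    | 0 =>
      simp at hsp
      rw [List.takeWhile_cons_of_neg (by simp [hsp])]
      simp
    | i + 1 =>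
      have hc : c ≠ ' ' := by
        have := hmin 0 (by omega)
        simpa using this
      rw [List.takeWhile_cons_of_pos (by simpa using hc)]
      simp only [List.length_cons]
      have := ih i (by simpa using hsp) (fun j hj => by
        have := hmin (j + 1) (by omega)
        simpa using this)
      omega

theorem find_space (s : List Char) (hm : ' ' ∈ s) :
    PySem.Chars.find s [' '] = ((s.takeWhile (· ≠ ' ')).length : Int) := by
  have hinf : [' '] <:+: s := (List.singleton_infix_iff ' ' s).mpr hm
  have h0 : 0 ≤ PySem.Chars.find s [' '] := (PySem.Chars.find_nonneg_iff s [' ']).mpr hinf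
  obtain ⟨hpre, hminp⟩ := PySem.Chars.find_spec h0
  have hsp : s[(PySem.Chars.find s [' ']).toNat]? = some ' ' := by
    obtain ⟨t, ht⟩ := hpre
    have h1 : s.drop (PySem.Chars.find s [' ']).toNat = ' ' :: t := by simpa using ht.symm
    have h2 := List.getElem?_drop (xs := s) (i := (PySem.Chars.find s [' ']).toNat) (j := 0)
    rw [h1] at h2
    simpa using h2.symm
  have hmin' : ∀ j, j < (PySem.Chars.find s [' ']).toNat → s[j]? ≠ some ' ' := by
    intro j hj hcon
    apply hminp j hj
    have h2 : (s.drop j)[0]? = some ' ' := by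
      rw [List.getElem?_drop]; simpa using hcon
    cases h3 : s.drop j with
    | nil => rw [h3] at h2; simp at h2
    | cons a u =>
      rw [h3] at h2; simp at h2
      refine ⟨u, ?_⟩
      simp [h2]
  have := takeWhile_length_eq s (PySem.Chars.find s [' ']).toNat hsp hmin'
  omega

theorem slice_token (cs : List Char) (pos e : Nat) :
    PySem.List.slice cs (some (pos : Int)) (some ((e : Int) + 1))
      = (cs.drop pos).take (e + 1 - pos) := by
  have h : ((e : Int) + 1) = ((e + 1 : Nat) : Int) := by push_cast; ring
  rw [h, PySem.List.slice_natCast]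

theorem main_loop (cs : List Char) :
    ∀ (fuel pos : Nat) (acc : List String),
      cs.length + 1 ≤ fuel + pos → wqTokens (cs.drop pos) = true →
      splitCliAux cs pos acc fuel = fsmB (cs.drop pos) .normal [] acc := by
  intro fuel
  induction fuel with
  | zero =>
    intro pos acc h hwq
    rw [List.drop_eq_nil_of_le (by omega)]
    simp [splitCliAux, fsmB]
  | succ fuel ih =>
    intro pos acc h hwq
    by_cases hp : pos < cs.length
    case neg =>
      rw [List.drop_eq_nil_of_le (by omega)]
      simp [splitCliAux, fsmB, hp]
    case pos =>
    have hdrop : cs.drop pos = cs[pos] :: cs.drop (pos + 1) := List.drop_eq_getElem_cons hp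
    by_cases hq : cs[pos] = '\''
    · -- quoted token
      have hwq1 : wqQuoted (cs.drop (pos + 1)) = true := by
        rw [hdrop, hq, wqTokens_quote] at hwq; exact hwq
      obtain ⟨e, he1, he2, hA, hB, hW⟩ :=
        quoted_scan cs pos cs.length (pos + 1) ['\''] acc (by omega) hwq1
      have hAstep : splitCliAux cs pos acc (fuel + 1)
          = splitCliAux cs (e + 1)
              (acc ++ [String.ofList (PySem.List.slice cs (some (pos : Int)) (some ((e : Int) + 1)))]) fuel := by
        simp [splitCliAux, hp, hq, hA]
      rw [hAstep, ih (e + 1) _ (by omega) hW]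
      rw [hdrop, hq]
      rw [show fsmB ('\'' :: cs.drop (pos + 1)) .normal [] acc
            = fsmB (cs.drop (pos + 1)) .inQuoted ['\''] acc by simp [fsmB]]
      rw [hB, slice_token]
      have h1 : e + 1 - pos = (e + 1 - (pos + 1)) + 1 := by omega
      rw [h1, List.drop_eq_getElem_cons hp, List.take_succ_cons, hq]
      simp
    · by_cases hs : cs[pos] = ' '
      · -- skip a space
        have hwq1 : wqTokens (cs.drop (pos + 1)) = true := by
          rw [hdrop, hs, wqTokens_space] at hwq; exact hwq
        have hAstep : splitCliAux cs pos acc (fuel + 1) = splitCliAux cs (pos + 1) acc fuel := by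
          simp [splitCliAux, hp, hs]
        rw [hAstep, ih (pos + 1) acc (by omega) hwq1, hdrop, hs]
        rw [show fsmB (' ' :: cs.drop (pos + 1)) .normal [] acc
              = fsmB (cs.drop (pos + 1)) .normal [] acc by simp [fsmB]]
      · -- unquoted token
        have htw : (cs.drop pos).takeWhile (· ≠ ' ')
            = cs[pos] :: (cs.drop (pos + 1)).takeWhile (· ≠ ' ') := by
          rw [hdrop]; exact List.takeWhile_cons_of_pos (by simp [hs])
        have hdw : (cs.drop pos).dropWhile (· ≠ ' ')
            = (cs.drop (pos + 1)).dropWhile (· ≠ ' ') := by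
          rw [hdrop]; exact List.dropWhile_cons_of_pos (by simp [hs])
        have hwq1 : wqTokens ((cs.drop (pos + 1)).dropWhile (· ≠ ' ')) = true := by
          rw [hdrop, wqTokens_other cs[pos] _ hs hq, wqUnquoted_eq] at hwq; exact hwq
        have hBstep : fsmB (cs.drop pos) .normal [] acc
            = fsmB (cs.drop (pos + 1)) .inUnquoted [cs[pos]] acc := by
          rw [hdrop]; simp [fsmB, hs, hq]
        by_cases hm : ' ' ∈ cs.drop pos
        · -- a space follows the token
          have hfind : PySem.Chars.find (cs.drop pos) [' ']
              = (((cs.drop pos).takeWhile (· ≠ ' ')).length : Int) := find_space _ hm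
          have hff : PySem.Chars.findFrom cs [' '] (pos : Int)
              = ((pos + ((cs.drop pos).takeWhile (· ≠ ' ')).length : Nat) : Int) := by
            rw [PySem.Chars.findFrom_natCast cs [' '] pos (by omega), hfind]
            simp
          have htok : PySem.List.slice cs (some (pos : Int))
                (some ((pos + ((cs.drop pos).takeWhile (· ≠ ' ')).length : Nat) : Int))
              = (cs.drop pos).takeWhile (· ≠ ' ') := by
            rw [PySem.List.slice_natCast]
            have h2 : pos + ((cs.drop pos).takeWhile (· ≠ ' ')).length - pos
                = ((cs.drop pos).takeWhile (· ≠ ' ')).length := by omega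
            rw [h2]
            exact (List.prefix_iff_eq_take.mp (List.takeWhile_prefix _)).symm
          have hneg : ¬ ((-1 : Int) = ((pos + ((cs.drop pos).takeWhile (· ≠ ' ')).length : Nat) : Int)) := by
            omega
          have hru : readUnescapedToken cs pos
              = ((cs.drop pos).takeWhile (· ≠ ' '),
                 pos + ((cs.drop pos).takeWhile (· ≠ ' ')).length) := by
            simp only [readUnescapedToken]
            rw [hff, if_neg hneg, htok, Int.toNat_natCast]
          have hAstep : splitCliAux cs pos acc (fuel + 1)
              = splitCliAux cs (pos + ((cs.drop pos).takeWhile (· ≠ ' ')).length)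
                  (acc ++ [String.ofList ((cs.drop pos).takeWhile (· ≠ ' '))]) fuel := by
            simp only [splitCliAux]
            rw [dif_pos hp, if_neg hq, if_neg hs, hru]
          have hlen1 : 1 ≤ ((cs.drop pos).takeWhile (· ≠ ' ')).length := by
            rw [htw]; simp
          have hdrop2 : cs.drop (pos + ((cs.drop pos).takeWhile (· ≠ ' ')).length)
              = (cs.drop pos).dropWhile (· ≠ ' ') := by
            rw [dropWhile_eq_drop (· ≠ ' ') (cs.drop pos), List.drop_drop]
          have hwq2 : wqTokens (cs.drop (pos + ((cs.drop pos).takeWhile (· ≠ ' ')).length)) = true := by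
            rw [hdrop2, hdw]; exact hwq1
          rw [hAstep, ih _ _ (by omega) hwq2, hdrop2, hdw]
          -- B side
          rw [hBstep, fsm_unquoted _ [cs[pos]] acc (by simp)]
          have hmem1 : ' ' ∈ cs.drop (pos + 1) := by
            rw [hdrop] at hm
            rcases List.mem_cons.mp hm with h' | h'
            · exact absurd h'.symm hs
            · exact h'
          have hdnn : (cs.drop (pos + 1)).dropWhile (· ≠ ' ') ≠ [] := by
            intro hmm
            have := (List.dropWhile_eq_nil_iff.mp hmm) ' ' hmem1
            simp at this
          cases hd : (cs.drop (pos + 1)).dropWhile (· ≠ ' ') with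
          | nil => exact absurd hd hdnn
          | cons x d' =>
            have hx : x = ' ' := by
              have h5 := List.head_dropWhile_not (fun c => decide (c ≠ ' '))
                (l := cs.drop (pos + 1)) (by rw [hd]; simp)
              simp only [hd, List.head_cons] at h5
              simpa using h5
            rw [htw]
            simp [fsmB, hx]
        · -- token runs to the end of the line
          have hnm : ¬ [' '] <:+: cs.drop pos := by
            rw [List.singleton_infix_iff]; exact hm
          have hfind : PySem.Chars.find (cs.drop pos) [' '] = -1 :=
            (PySem.Chars.find_eq_neg_one_iff _ _).mpr hnm
          have hff : PySem.Chars.findFrom cs [' '] (pos : Int) = -1 := by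
            rw [PySem.Chars.findFrom_natCast cs [' '] pos (by omega), hfind]
            simp
          have hru : readUnescapedToken cs pos = (cs.drop pos, cs.length) := by
            simp only [readUnescapedToken]
            rw [hff]
            simp [PySem.List.slice_from_natCast]
          have hAstep : splitCliAux cs pos acc (fuel + 1)
              = splitCliAux cs cs.length (acc ++ [String.ofList (cs.drop pos)]) fuel := by
            simp only [splitCliAux]
            rw [dif_pos hp, if_neg hq, if_neg hs, hru]
          rw [hAstep, ih cs.length _ (by omega) (by rw [List.drop_length]; exact wqTokens_nil)]
          rw [List.drop_length]
          rw [show fsmB [] .normal [] (acc ++ [String.ofList (cs.drop pos)])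
                = acc ++ [String.ofList (cs.drop pos)] by simp [fsmB]]
          -- B side
          rw [hBstep, fsm_unquoted _ [cs[pos]] acc (by simp)]
          have hall : ∀ x ∈ cs.drop (pos + 1), (fun c => decide (c ≠ ' ')) x = true := by
            intro x hx
            have : x ∈ cs.drop pos := by rw [hdrop]; exact List.mem_cons_of_mem _ hx
            simp
            intro hxx
            exact hm (hxx ▸ this)
          rw [List.dropWhile_eq_nil_iff.mpr hall]
          rw [List.takeWhile_eq_self_iff.mpr hall]
          show acc ++ [String.ofList (cs.drop pos)]
              = acc ++ [String.ofList ([cs[pos]] ++ cs.drop (pos + 1))]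
          rw [hdrop]; simp

-- ===== VERDICT (by name: the statement is the Claim_ definition above) =====
theorem split_cli_spec : Claim_equal_split_cli := by
  intro line _ hpre
  unfold Spec_split_cli split_cli split_cli_alt
  have h := main_loop line.toList (line.toList.length + 1) 0 [] (by omega)
    (by simpa [Pre_split_cli] using hpre)
  simpa using h
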